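-- pv_equiv track=rewrite | github.com/sherinksaji/fuzzing | Mutator.py | flip_bit_general
-- ===== SOURCE A (Python) =====
-- def flip_bit_general(text, n, k, stepover):
--     result = ""
--     for i in range(0, len(text), k + stepover):
--         chunk = text[i:i + k]
--         flipped_chunk = ""
--         for j in range(len(chunk)):
--             if j < len(chunk) and chunk[j].isalnum():
--                 ascii_value = ord(chunk[j])
--                 flipped_ascii_value = ascii_value ^ (1 << ((j + n) % k))
--                 # Ensure the ASCII value is within the range of printable characters
--                 if flipped_ascii_value < 32 or flipped_ascii_value > 126:
--                     flipped_ascii_value = (flipped_ascii_value % 95) + 32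
--                 flipped_chunk += chr(flipped_ascii_value)
--             else:
--                 flipped_chunk += chunk[j]
--         result += flipped_chunk
--     return result
-- ===== SOURCE B (Python) =====
-- def flip_bit_general(text, n, k, stepover):
--     period = k + stepover
--     out = []
--     for i, ch in enumerate(text):
--         pos = i % period
--         if pos < k:
--             if ch.isalnum():
--                 v = ord(ch) ^ (1 << ((pos + n) % k))
--                 if v < 32 or v > 126:
--                     v = v % 95 + 32
--                 out.append(chr(v))
--             else:
--                 out.append(ch)
--     return "".join(out)
-- ===== Notes on version B (the rewrite author's own statement) =====
-- stated objective: simpler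
-- what changed: Replaces the nested loops (chunk starts via range-with-step, slicing out each chunk, inner index loop with quadratic string concatenation) by a single flat pass over enumerate(text) that keeps a character exactly when its index modulo the period k+stepover falls below k, flipping it by its in-chunk position, joined once at the end; …
-- outside the precondition, e.g. on flip_bit_general('abc', 2, 3, -1): A returns 'ecag', B returns 'ecg'; on flip_bit_general('ab', 0, 1, -3): A returns '', B returns '`c'; on flip_bit_general('+-', 0, -1, 3): A returns '+', B returns ''
import Mathlib
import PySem

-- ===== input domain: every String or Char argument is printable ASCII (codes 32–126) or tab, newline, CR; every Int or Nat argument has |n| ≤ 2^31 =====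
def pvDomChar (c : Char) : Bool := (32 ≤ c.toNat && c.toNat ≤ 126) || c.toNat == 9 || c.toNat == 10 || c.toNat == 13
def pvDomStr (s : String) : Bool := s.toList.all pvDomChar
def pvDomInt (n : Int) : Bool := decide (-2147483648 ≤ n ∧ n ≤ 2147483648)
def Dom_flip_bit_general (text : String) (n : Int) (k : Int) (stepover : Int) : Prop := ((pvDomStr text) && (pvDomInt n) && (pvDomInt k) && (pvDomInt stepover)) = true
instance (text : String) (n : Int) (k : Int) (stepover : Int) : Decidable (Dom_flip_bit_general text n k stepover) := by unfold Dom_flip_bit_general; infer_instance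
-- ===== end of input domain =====

-- B replaces A's chunk loop (range with step, slicing, inner index loop, quadratic string +=)
-- by one flat pass over enumerate(text) keyed on index mod the period; objective: simpler.

-- ===== PORT A =====
-- strings are handled as List Char ('+=' on a string accumulator becomes '++ [·]'); String.ofList at the end
def flip_bit_general (text : String) (n : Int) (k : Int) (stepover : Int) : String :=
  String.ofList ((PySem.List.pyRange 0 (text.toList.length : Int) (k + stepover)).foldl (fun result i =>
    -- chunk = text[i:i+k]
    result ++ ((List.range (PySem.List.slice text.toList (some i) (some (i + k))).length).foldl (fun flipped_chunk j =>
      if j < (PySem.List.slice text.toList (some i) (some (i + k))).length &&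
         PySem.Chars.isalnum (PySem.List.pyGetD (PySem.List.slice text.toList (some i) (some (i + k))) (j : Int) ' ') then
        -- ascii_value ^ (1 << ((j + n) % k)); the shift amount (j+n)%k is ≥ 0 whenever this branch
        -- runs inside Pre_ (there k > 0), so .toNat is exact; Python raises on a negative amount (k < 0, excluded)
        flipped_chunk ++ [Char.ofNat (if PySem.Int.bxor ((PySem.List.pyGetD (PySem.List.slice text.toList (some i) (some (i + k))) (j : Int) ' ').toNat : Int) ((1 : Int) <<< (PySem.Int.mod ((j : Int) + n) k).toNat) < 32 ||
                                         PySem.Int.bxor ((PySem.List.pyGetD (PySem.List.slice text.toList (some i) (some (i + k))) (j : Int) ' ').toNat : Int) ((1 : Int) <<< (PySem.Int.mod ((j : Int) + n) k).toNat) > 126 then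
                                        PySem.Int.mod (PySem.Int.bxor ((PySem.List.pyGetD (PySem.List.slice text.toList (some i) (some (i + k))) (j : Int) ' ').toNat : Int) ((1 : Int) <<< (PySem.Int.mod ((j : Int) + n) k).toNat)) 95 + 32
                                      else
                                        PySem.Int.bxor ((PySem.List.pyGetD (PySem.List.slice text.toList (some i) (some (i + k))) (j : Int) ' ').toNat : Int) ((1 : Int) <<< (PySem.Int.mod ((j : Int) + n) k).toNat)).toNat]
      else
        flipped_chunk ++ [PySem.List.pyGetD (PySem.List.slice text.toList (some i) (some (i + k))) (j : Int) ' ']) [])) [])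

-- ===== PORT B =====
-- one flat pass over enumerate(text): keep a character iff its index mod the period is < k,
-- flip it by its in-chunk position; accumulate into a list, join once
def flip_bit_general_alt (text : String) (n : Int) (k : Int) (stepover : Int) : String :=
  String.ofList ((PySem.List.enumerate text.toList 0).foldl (fun out ic =>
    if PySem.Int.mod ic.1 (k + stepover) < k then
      if PySem.Chars.isalnum ic.2 then
        out ++ [Char.ofNat (if PySem.Int.bxor ((ic.2.toNat : Int)) ((1 : Int) <<< (PySem.Int.mod (PySem.Int.mod ic.1 (k + stepover) + n) k).toNat) < 32 ||
                               PySem.Int.bxor ((ic.2.toNat : Int)) ((1 : Int) <<< (PySem.Int.mod (PySem.Int.mod ic.1 (k + stepover) + n) k).toNat) > 126 then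
                              PySem.Int.mod (PySem.Int.bxor ((ic.2.toNat : Int)) ((1 : Int) <<< (PySem.Int.mod (PySem.Int.mod ic.1 (k + stepover) + n) k).toNat)) 95 + 32
                            else
                              PySem.Int.bxor ((ic.2.toNat : Int)) ((1 : Int) <<< (PySem.Int.mod (PySem.Int.mod ic.1 (k + stepover) + n) k).toNat)).toNat]
      else out ++ [ic.2]
    else out) [])

-- ===== PRECONDITION & SPEC =====
-- Pre_ excludes the corners outside the task's natural domain of non-negative chunk size and
-- stepover: the zero period k+stepover, where A raises ValueError from range's zero step; negative
-- chunk size k with a positive period, where A raises ValueError on the negative shift count as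
-- soon as an alphanumeric character is reached; and, on nonempty text, the remaining
-- negative-parameter corners (negative stepover, negative period), where chunks overlap or no
-- chunk is visited and no particular behaviour is specified, so A's and B's values are each
-- defensible readings.
def Pre_flip_bit_general (text : String) (n : Int) (k : Int) (stepover : Int) : Prop :=
  k + stepover ≠ 0 ∧
    (text = "" ∨
      (0 < k + stepover ∧ 0 ≤ k ∧ (0 ≤ stepover ∨ (text.toList.length : Int) ≤ k + stepover)) ∨
      (k + stepover < 0 ∧ 0 ≤ stepover))
instance (text : String) (n : Int) (k : Int) (stepover : Int) : Decidable (Pre_flip_bit_general text n k stepover) := by unfold Pre_flip_bit_general; infer_instance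
def pvWitness_flip_bit_general : String × Int × Int × Int := ("hello", 1, 2, 1)

def Spec_flip_bit_general (text : String) (n : Int) (k : Int) (stepover : Int) (out : String) : Prop := out = flip_bit_general_alt text n k stepover
instance (text : String) (n : Int) (k : Int) (stepover : Int) (out : String) : Decidable (Spec_flip_bit_general text n k stepover out) := by unfold Spec_flip_bit_general; infer_instance

-- ===== CLAIM (what is proved, stated in full; the proofs are below) =====
def Claim_equal_flip_bit_general : Prop := ∀ (text : String) (n : Int) (k : Int) (stepover : Int), Dom_flip_bit_general text n k stepover → Pre_flip_bit_general text n k stepover → Spec_flip_bit_general text n k stepover (flip_bit_general text n k stepover)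

-- ===== LEMMAS AND PROOFS =====

-- the per-character flip both programs perform, with j the in-chunk position
def fchar (n k j : Int) (c : Char) : Char :=
  if PySem.Chars.isalnum c then
    Char.ofNat (if PySem.Int.bxor ((c.toNat : Int)) ((1 : Int) <<< (PySem.Int.mod (j + n) k).toNat) < 32 ||
                   PySem.Int.bxor ((c.toNat : Int)) ((1 : Int) <<< (PySem.Int.mod (j + n) k).toNat) > 126 then
                  PySem.Int.mod (PySem.Int.bxor ((c.toNat : Int)) ((1 : Int) <<< (PySem.Int.mod (j + n) k).toNat)) 95 + 32
                else
                  PySem.Int.bxor ((c.toNat : Int)) ((1 : Int) <<< (PySem.Int.mod (j + n) k).toNat)).toNat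
  else c

-- a position-indexed map (A's inner chunk loop, structurally)
def mflG (G : Int → Char → Char) : Int → List Char → List Char
  | _, [] => []
  | j, c :: t => G j c :: mflG G (j + 1) t

def mfl (n k : Int) : Int → List Char → List Char := mflG (fchar n k)

-- B's single pass, structurally (s = the running enumerate index)
def bRec (n k p : Int) : Int → List Char → List Char
  | _, [] => []
  | s, c :: t => (if PySem.Int.mod s p < k then [fchar n k (PySem.Int.mod s p) c] else []) ++ bRec n k p (s + 1) t

theorem pyRange_neg_nil (b p : Int) (hp : p < 0) (hb : 0 ≤ b) : PySem.List.pyRange 0 b p = [] := by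
  have h0 : ¬ p = 0 := by omega
  have h1 : ¬ 0 < p := by omega
  have h2 : ¬ b < 0 := by omega
  simp [PySem.List.pyRange, h0, h1, h2]

theorem bRec_nil_of_period_neg (n k p : Int) (hp : p < 0) (hkp : k ≤ p) : ∀ (xs : List Char) (s : Int),
    bRec n k p s xs = [] := by
  intro xs
  induction xs with
  | nil => intro s; rfl
  | cons c t ih =>
    intro s
    have hb := PySem.Int.mod_neg_bounds s hp
    rw [show bRec n k p s (c :: t) = (if PySem.Int.mod s p < k then [fchar n k (PySem.Int.mod s p) c] else []) ++ bRec n k p (s + 1) t from rfl,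
        if_neg (by omega), ih]
    rfl

theorem pyRange_pos_cons (a b p : Int) (hp : 0 < p) :
    PySem.List.pyRange a b p = if a < b then a :: PySem.List.pyRange (a + p) b p else [] := by
  rw [PySem.List.pyRange_of_pos a b hp, PySem.List.pyRange_of_pos (a + p) b hp]
  by_cases h : a < b
  · rw [if_pos h, if_pos h]
    by_cases h2 : a + p < b
    · rw [if_pos h2]
      have hx : 0 ≤ b - (a + p) + p - 1 := by omega
      have hq : 0 ≤ (b - (a + p) + p - 1) / p := Int.ediv_nonneg hx (by omega)
      have hm : (b - a + p - 1) / p = (b - (a + p) + p - 1) / p + 1 := by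
        have e : b - a + p - 1 = (b - (a + p) + p - 1) + 1 * p := by ring
        rw [e, Int.add_mul_ediv_right _ _ (by omega : p ≠ 0)]
      have hmn : ((b - a + p - 1) / p).toNat = ((b - (a + p) + p - 1) / p).toNat + 1 := by
        rw [hm]; omega
      rw [hmn, List.range_succ_eq_map, List.map_cons, List.map_map]
      refine congrArg₂ _ (by simp) ?_
      refine List.map_congr_left ?_
      intro t _
      simp only [Function.comp_apply, Nat.succ_eq_add_one]
      push_cast
      ring
    · rw [if_neg h2]
      have hv : (b - a + p - 1) / p = 1 := by
        have e : b - a + p - 1 = (b - a - 1) + 1 * p := by ring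
        rw [e, Int.add_mul_ediv_right _ _ (by omega : p ≠ 0),
            Int.ediv_eq_zero_of_lt (by omega) (by omega)]
        norm_num
      rw [hv]
      simp
  · rw [if_neg h, if_neg h]
    rfl

theorem pyRange_shift (a b p : Int) (hp : 0 < p) :
    PySem.List.pyRange (a + p) b p = (PySem.List.pyRange a (b - p) p).map (· + p) := by
  rw [PySem.List.pyRange_of_pos _ _ hp, PySem.List.pyRange_of_pos _ _ hp, List.map_map]
  have hn : b - (a + p) + p - 1 = b - p - a + p - 1 := by ring
  rw [hn]
  by_cases h : a < b - p
  · rw [if_pos (by omega : a + p < b), if_pos h]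
    refine List.map_congr_left ?_
    intro t _
    simp only [Function.comp_apply]
    ring
  · rw [if_neg (by omega : ¬ a + p < b), if_neg h]
    rfl

theorem map_range_G (G : Int → Char → Char) : ∀ (xs : List Char) (off : Int),
    (List.range xs.length).map (fun j =>
      if j < xs.length then G (off + (j : Int)) (PySem.List.pyGetD xs (j : Int) ' ')
      else PySem.List.pyGetD xs (j : Int) ' ') = mflG G off xs := by
  intro xs
  induction xs with
  | nil => intro off; simp [mflG]
  | cons c t ih =>
    intro off
    rw [List.length_cons, List.range_succ_eq_map, List.map_cons, List.map_map]
    rw [show mflG G off (c :: t) = G off c :: mflG G (off + 1) t from rfl]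
    refine congrArg₂ _ ?_ ?_
    · simp [PySem.List.pyGetD_zero]
    · rw [← ih (off + 1)]
      refine List.map_congr_left ?_
      intro j hj
      have h2 : off + ((j : Int) + 1) = off + 1 + (j : Int) := by ring
      simp only [Function.comp_apply, Nat.succ_eq_add_one, PySem.List.pyGetD_natCast,
        List.getD_cons_succ, Nat.add_lt_add_iff_right, Nat.cast_add,
        Nat.cast_one, h2]

theorem foldl_guard_append {b : Type} (cond : b -> Bool) (X Y : b -> Char) : ∀ (l : List b) (acc : List Char),
    l.foldl (fun fc j => if cond j then fc ++ [X j] else fc ++ [Y j]) acc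
      = acc ++ l.map (fun j => if cond j then X j else Y j) := by
  intro l
  induction l with
  | nil => intro acc; simp
  | cons a t ih =>
    intro acc
    by_cases h : cond a <;> simp [h, ih, List.append_assoc]

theorem innerA_foldl (n k : Int) (xs : List Char) :
    (List.range xs.length).foldl (fun flipped_chunk j =>
      if j < xs.length && PySem.Chars.isalnum (PySem.List.pyGetD xs (j : Int) ' ') then
        flipped_chunk ++ [Char.ofNat (if PySem.Int.bxor ((PySem.List.pyGetD xs (j : Int) ' ').toNat : Int) ((1 : Int) <<< (PySem.Int.mod ((j : Int) + n) k).toNat) < 32 ||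
                                         PySem.Int.bxor ((PySem.List.pyGetD xs (j : Int) ' ').toNat : Int) ((1 : Int) <<< (PySem.Int.mod ((j : Int) + n) k).toNat) > 126 then
                                        PySem.Int.mod (PySem.Int.bxor ((PySem.List.pyGetD xs (j : Int) ' ').toNat : Int) ((1 : Int) <<< (PySem.Int.mod ((j : Int) + n) k).toNat)) 95 + 32
                                      else
                                        PySem.Int.bxor ((PySem.List.pyGetD xs (j : Int) ' ').toNat : Int) ((1 : Int) <<< (PySem.Int.mod ((j : Int) + n) k).toNat)).toNat]
      else
        flipped_chunk ++ [PySem.List.pyGetD xs (j : Int) ' ']) [] = mfl n k 0 xs := by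
  unfold mfl
  rw [foldl_guard_append, List.nil_append, ← map_range_G (fchar n k) xs 0]
  refine List.map_congr_left ?_
  intro j hj
  by_cases h1 : j < xs.length
  · simp [h1, fchar]
  · simp [h1]

theorem foldB (n k p : Int) : ∀ (xs : List Char) (s : Int) (acc : List Char),
    (PySem.List.enumerate xs s).foldl (fun out ic =>
      if PySem.Int.mod ic.1 p < k then
        if PySem.Chars.isalnum ic.2 then
          out ++ [Char.ofNat (if PySem.Int.bxor ((ic.2.toNat : Int)) ((1 : Int) <<< (PySem.Int.mod (PySem.Int.mod ic.1 p + n) k).toNat) < 32 ||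
                                 PySem.Int.bxor ((ic.2.toNat : Int)) ((1 : Int) <<< (PySem.Int.mod (PySem.Int.mod ic.1 p + n) k).toNat) > 126 then
                                PySem.Int.mod (PySem.Int.bxor ((ic.2.toNat : Int)) ((1 : Int) <<< (PySem.Int.mod (PySem.Int.mod ic.1 p + n) k).toNat)) 95 + 32
                              else
                                PySem.Int.bxor ((ic.2.toNat : Int)) ((1 : Int) <<< (PySem.Int.mod (PySem.Int.mod ic.1 p + n) k).toNat)).toNat]
        else out ++ [ic.2]
      else out) acc = acc ++ bRec n k p s xs := by
  intro xs
  induction xs with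
  | nil => intro s acc; simp [PySem.List.enumerate_nil, bRec]
  | cons c t ih =>
    intro s acc
    rw [PySem.List.enumerate_cons, List.foldl_cons, ih]
    rw [show bRec n k p s (c :: t) = (if PySem.Int.mod s p < k then [fchar n k (PySem.Int.mod s p) c] else []) ++ bRec n k p (s + 1) t from rfl]
    by_cases h1 : PySem.Int.mod s p < k
    · by_cases h2 : PySem.Chars.isalnum c
      · simp [h1, h2, fchar, List.append_assoc]
      · simp [h1, h2, fchar, List.append_assoc]
    · simp [h1]

theorem bRec_shift (n k p : Int) (hp : 0 < p) : ∀ (xs : List Char) (s : Int),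
    bRec n k p (s + p) xs = bRec n k p s xs := by
  intro xs
  induction xs with
  | nil => intro s; rfl
  | cons c t ih =>
    intro s
    have hm : PySem.Int.mod (s + p) p = PySem.Int.mod s p := by
      rw [PySem.Int.mod_eq_emod_of_pos hp, PySem.Int.mod_eq_emod_of_pos hp]
      simp
    rw [show bRec n k p (s + p) (c :: t) = (if PySem.Int.mod (s + p) p < k then [fchar n k (PySem.Int.mod (s + p) p) c] else []) ++ bRec n k p ((s + p) + 1) t from rfl,
        show bRec n k p s (c :: t) = (if PySem.Int.mod s p < k then [fchar n k (PySem.Int.mod s p) c] else []) ++ bRec n k p (s + 1) t from rfl,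
        hm, show s + p + 1 = (s + 1) + p by ring, ih]

theorem bRec_append (n k p : Int) : ∀ (xs ys : List Char) (s : Int),
    bRec n k p s (xs ++ ys) = bRec n k p s xs ++ bRec n k p (s + xs.length) ys := by
  intro xs
  induction xs with
  | nil => intro ys s; simp [bRec]
  | cons c t ih =>
    intro ys s
    rw [List.cons_append,
        show bRec n k p s (c :: (t ++ ys)) = (if PySem.Int.mod s p < k then [fchar n k (PySem.Int.mod s p) c] else []) ++ bRec n k p (s + 1) (t ++ ys) from rfl,
        show bRec n k p s (c :: t) = (if PySem.Int.mod s p < k then [fchar n k (PySem.Int.mod s p) c] else []) ++ bRec n k p (s + 1) t from rfl,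
        ih, List.length_cons, List.append_assoc]
    have e : s + ((t.length + 1 : Nat) : Int) = (s + 1) + (t.length : Int) := by push_cast; ring
    rw [e]

theorem bRec_small (n k p : Int) (hp : 0 < p) (hk : 0 ≤ k) : ∀ (xs : List Char) (s : Nat),
    (s : Int) + xs.length ≤ p → bRec n k p s xs = mfl n k s (List.take (k.toNat - s) xs) := by
  intro xs
  induction xs with
  | nil => intro s hs; simp [bRec, mfl, mflG]
  | cons c t ih =>
    intro s hs
    have hkz : (k.toNat : Int) = k := Int.toNat_of_nonneg hk
    rw [List.length_cons] at hs
    push_cast at hs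
    have hsp : (s : Int) < p := by omega
    have hm : PySem.Int.mod (s : Int) p = (s : Int) := by
      rw [PySem.Int.mod_eq_emod_of_pos hp]
      exact Int.emod_eq_of_lt (by positivity) hsp
    rw [show bRec n k p (s : Int) (c :: t) = (if PySem.Int.mod (s : Int) p < k then [fchar n k (PySem.Int.mod (s : Int) p) c] else []) ++ bRec n k p ((s : Int) + 1) t from rfl,
        hm]
    have ihs := ih (s + 1) (by push_cast; omega)
    by_cases hc : (s : Int) < k
    · have h1 : k.toNat - s = (k.toNat - (s + 1)) + 1 := by omega
      rw [if_pos hc, h1, List.take_succ_cons]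
      rw [show mfl n k (s : Int) (c :: List.take (k.toNat - (s + 1)) t)
            = fchar n k (s : Int) c :: mfl n k ((s : Int) + 1) (List.take (k.toNat - (s + 1)) t) from rfl]
      rw [show ((s : Int) + 1) = ((s + 1 : Nat) : Int) by push_cast; ring, ← ihs]
      rfl
    · have h0 : k.toNat - s = 0 := by omega
      have h0' : k.toNat - (s + 1) = 0 := by omega
      rw [if_neg hc, h0]
      rw [h0'] at ihs
      simp only [List.take_zero] at ihs ⊢
      rw [show ((s : Int) + 1) = ((s + 1 : Nat) : Int) by push_cast; ring, ihs]
      simp [mfl, mflG]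

theorem slice_front (cs : List Char) (k : Int) (hk : 0 ≤ k) :
    PySem.List.slice cs (some 0) (some (0 + k)) = List.take k.toNat cs := by
  rw [zero_add, PySem.List.slice_zero_start]
  exact PySem.List.slice_to cs hk

theorem slice_shift (cs : List Char) (i p k : Int) (hi : 0 ≤ i) (hp : 0 ≤ p) (hk : 0 ≤ k) :
    PySem.List.slice cs (some (i + p)) (some (i + p + k)) =
      PySem.List.slice (List.drop p.toNat cs) (some i) (some (i + k)) := by
  have e1 : (i + p).toNat = p.toNat + i.toNat := by omega
  rw [PySem.List.slice_toNat cs (by omega) (by omega),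
    PySem.List.slice_toNat (List.drop p.toNat cs) hi (by omega),
    List.drop_drop, e1]
  congr 1
  omega

theorem main_aux (n k p : Int) (hp : 0 < p) (hk : 0 ≤ k) (hkp : k ≤ p) : ∀ (N : Nat) (cs : List Char), cs.length ≤ N →
    (PySem.List.pyRange 0 (cs.length : Int) p).flatMap
        (fun i => mfl n k 0 (PySem.List.slice cs (some i) (some (i + k)))) = bRec n k p 0 cs := by
  intro N
  induction N with
  | zero =>
    intro cs hlen
    have hnil : cs = [] := List.eq_nil_of_length_eq_zero (Nat.le_zero.mp hlen)
    subst hnil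
    simp only [List.length_nil, Nat.cast_zero]
    rw [pyRange_pos_cons 0 0 p hp, if_neg (by omega)]
    rfl
  | succ N ih =>
    intro cs hlen
    rcases eq_or_ne cs [] with hnil | hnil
    · subst hnil
      simp only [List.length_nil, Nat.cast_zero]
      rw [pyRange_pos_cons 0 0 p hp, if_neg (by omega)]
      rfl
    · have hL : 0 < cs.length := List.length_pos_iff.mpr hnil
      have hL' : (0 : Int) < (cs.length : Int) := by exact_mod_cast hL
      rw [pyRange_pos_cons 0 _ p hp, if_pos hL', List.flatMap_cons, slice_front cs k hk,
        pyRange_shift 0 _ p hp, List.flatMap_map]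
      have hrest : (PySem.List.pyRange 0 ((cs.length : Int) - p) p).flatMap
            (fun i => mfl n k 0 (PySem.List.slice cs (some (i + p)) (some (i + p + k))))
          = bRec n k p 0 (List.drop p.toNat cs) := by
        have hcg : ∀ i ∈ PySem.List.pyRange 0 ((cs.length : Int) - p) p,
            mfl n k 0 (PySem.List.slice cs (some (i + p)) (some (i + p + k)))
              = mfl n k 0 (PySem.List.slice (List.drop p.toNat cs) (some i) (some (i + k))) := by
          intro i hi
          have h0i : 0 ≤ i := by
            have := (PySem.List.mem_pyRange_iff_of_pos hp i).mp hi
            omega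
          rw [slice_shift cs i p k h0i hp.le hk]
        rw [List.flatMap_congr hcg]
        by_cases hple : p ≤ (cs.length : Int)
        · have hlen2 : ((List.drop p.toNat cs).length : Int) = (cs.length : Int) - p := by
            rw [List.length_drop]; omega
          rw [← hlen2]
          exact ih _ (by rw [List.length_drop]; omega)
        · have h1 : PySem.List.pyRange 0 ((cs.length : Int) - p) p = [] := by
            rw [pyRange_pos_cons _ _ _ hp, if_neg (by omega)]
          have h2 : List.drop p.toNat cs = [] := by
            apply List.drop_eq_nil_of_le
            omega
          rw [h1, h2]
          rfl
      rw [hrest]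
      conv_rhs => rw [← List.take_append_drop p.toNat cs]
      rw [bRec_append]
      have hktk : k.toNat ≤ p.toNat := by omega
      refine congrArg₂ _ ?_ ?_
      · have hsmall := bRec_small n k p hp hk (List.take p.toNat cs) 0
          (by rw [List.length_take]; push_cast; omega)
        simp only [Nat.cast_zero, Nat.sub_zero] at hsmall
        rw [hsmall, List.take_take, min_eq_left hktk]
      · by_cases hple : p ≤ (cs.length : Int)
        · have htl : ((List.take p.toNat cs).length : Int) = p := by
            rw [List.length_take]; push_cast; omega
          rw [htl]
          have := (bRec_shift n k p hp (List.drop p.toNat cs) 0).symm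
          simpa using this
        · have h2 : List.drop p.toNat cs = [] := by
            apply List.drop_eq_nil_of_le
            omega
          rw [h2]
          rfl

-- ===== VERDICT (by name: the statement is the Claim_ definition above) =====
theorem flip_bit_general_spec : Claim_equal_flip_bit_general := by
  intro text n k stepover hdom hpre
  unfold Spec_flip_bit_general
  obtain ⟨hne, hcase⟩ := hpre
  simp only [flip_bit_general, flip_bit_general_alt]
  rw [PySem.List.foldl_append_eq_flatMap, List.nil_append,
    foldB n k (k + stepover) text.toList 0 [], List.nil_append]
  rw [show (fun i => (List.range (PySem.List.slice text.toList (some i) (some (i + k))).length).foldl (fun flipped_chunk j =>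
    if j < (PySem.List.slice text.toList (some i) (some (i + k))).length &&
       PySem.Chars.isalnum (PySem.List.pyGetD (PySem.List.slice text.toList (some i) (some (i + k))) (j : Int) ' ') then
      flipped_chunk ++ [Char.ofNat (if PySem.Int.bxor ((PySem.List.pyGetD (PySem.List.slice text.toList (some i) (some (i + k))) (j : Int) ' ').toNat : Int) ((1 : Int) <<< (PySem.Int.mod ((j : Int) + n) k).toNat) < 32 ||
                                       PySem.Int.bxor ((PySem.List.pyGetD (PySem.List.slice text.toList (some i) (some (i + k))) (j : Int) ' ').toNat : Int) ((1 : Int) <<< (PySem.Int.mod ((j : Int) + n) k).toNat) > 126 then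
                                      PySem.Int.mod (PySem.Int.bxor ((PySem.List.pyGetD (PySem.List.slice text.toList (some i) (some (i + k))) (j : Int) ' ').toNat : Int) ((1 : Int) <<< (PySem.Int.mod ((j : Int) + n) k).toNat)) 95 + 32
                                    else
                                      PySem.Int.bxor ((PySem.List.pyGetD (PySem.List.slice text.toList (some i) (some (i + k))) (j : Int) ' ').toNat : Int) ((1 : Int) <<< (PySem.Int.mod ((j : Int) + n) k).toNat)).toNat]
    else
      flipped_chunk ++ [PySem.List.pyGetD (PySem.List.slice text.toList (some i) (some (i + k))) (j : Int) ' ']) [])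
    = fun i => mfl n k 0 (PySem.List.slice text.toList (some i) (some (i + k)))
    from funext fun i => innerA_foldl n k _]
  refine congrArg String.ofList ?_
  rcases hcase with hempty | ⟨hp, hk, hrest⟩ | ⟨hneg, hso⟩
  · -- empty text: both sides are the empty list
    subst hempty
    have hL : ("" : String).toList = [] := rfl
    rw [hL]
    have hA : PySem.List.pyRange 0 (([] : List Char).length : Int) (k + stepover) = [] := by
      by_cases hp : 0 < k + stepover
      · rw [pyRange_pos_cons _ _ _ hp, if_neg (by simp)]
      · exact pyRange_neg_nil _ _ (by omega) (by simp)
    rw [hA]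
    rfl
  · rcases hrest with hst | hshort
    · exact main_aux n k (k + stepover) hp hk (by omega) text.toList.length text.toList le_rfl
    · -- the whole text fits inside one period: A visits only chunk start 0, B keeps only indices < k
      by_cases hL : 0 < text.toList.length
      · rw [pyRange_pos_cons 0 _ _ hp, if_pos (by exact_mod_cast hL), List.flatMap_cons,
            pyRange_pos_cons (0 + (k + stepover)) _ _ hp, if_neg (by omega), List.flatMap_nil,
            List.append_nil, slice_front text.toList k hk]
        have hsm := bRec_small n k (k + stepover) hp hk text.toList 0 (by omega)
        simp only [Nat.cast_zero, Nat.sub_zero] at hsm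
        rw [hsm]
      · have hnil : text.toList = [] := List.eq_nil_of_length_eq_zero (by omega)
        rw [hnil]
        simp only [List.length_nil, Nat.cast_zero]
        rw [pyRange_pos_cons 0 0 _ hp, if_neg (by omega)]
        rfl
  · -- negative period with non-negative stepover (so k ≤ k+stepover < 0): both sides empty
    rw [pyRange_neg_nil _ _ hneg (by positivity),
        bRec_nil_of_period_neg n k (k + stepover) hneg (by omega) text.toList 0]
    rfl
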